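-- pv_equiv track=rewrite | github.com/Sugitha9022/Asha-AI-Hackathon | app/dialog_manager.py | _handle_typos
-- ===== SOURCE A (Python) =====
-- def _handle_typos(text: str) -> str:
--     """Handle common typing errors and correct them"""
--     typo_map = {
--         "wokshop": "workshop",
--         "datascience": "data science",
--         "pthon": "python"
--     }
--     for typo, correct in typo_map.items():
--         text = text.replace(typo, correct)
--     return text
-- ===== SOURCE B (Python) =====
-- import re
--
-- _TYPO_MAP = {
--     "wokshop": "workshop",
--     "datascience": "data science",
--     "pthon": "python"
-- }
-- _TYPO_RE = re.compile("|".join(re.escape(t) for t in _TYPO_MAP))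
--
--
-- def _handle_typos(text: str) -> str:
--     """Handle common typing errors and correct them"""
--     return _TYPO_RE.sub(lambda m: _TYPO_MAP[m.group(0)], text)
-- ===== Notes on version B (the rewrite author's own statement) =====
-- stated objective: idiomatic
-- what changed: The three sequential full-text str.replace passes are replaced by one compiled regex built from the escaped typo keys and a single re.sub call with a dict-lookup replacement function, i.e. one left-to-right scan with leftmost first-alternative matching instead of three scans.
-- intended difference: On texts containing 'wokshopthon', A's sequential passes cascade: the inserted correction 'workshop' ends in 'p' and combines with the following 'thon' into a fresh 'pthon' match, so A returns e.g. 'workshopython'; B corrects each typo in the original text exactly once and returns 'workshopthon', which is the intended behaviour of a typo-correction table. — e.g. on _handle_typos("wokshopthon"): A returns "workshopython", B returns "workshopthon"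
import Mathlib
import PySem

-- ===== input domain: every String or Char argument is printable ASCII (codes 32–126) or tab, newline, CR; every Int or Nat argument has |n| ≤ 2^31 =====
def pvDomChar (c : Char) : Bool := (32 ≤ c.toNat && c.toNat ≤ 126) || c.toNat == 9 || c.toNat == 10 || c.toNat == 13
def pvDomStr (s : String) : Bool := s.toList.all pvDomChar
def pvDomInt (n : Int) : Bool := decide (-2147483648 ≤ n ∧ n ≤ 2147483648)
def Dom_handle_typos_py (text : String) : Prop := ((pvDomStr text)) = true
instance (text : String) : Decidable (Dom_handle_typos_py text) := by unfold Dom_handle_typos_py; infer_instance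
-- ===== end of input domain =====

-- B replaces A's three sequential full-text .replace passes by ONE combined
-- left-to-right scan (a compiled regex alternation with a dict-lookup replacement
-- in Python); equal to A on every text outside D_ below.

-- ===== PORT A =====
def handle_typos_py (text : String) : String :=
  let typo_map : PySem.Dict String String :=
    PySem.Dict.mk [("wokshop", "workshop"), ("datascience", "data science"), ("pthon", "python")]
  typo_map.items.foldl (fun t p => PySem.Str.replace t p.1 p.2) text

-- ===== PORT B =====
-- B compiles the regex "wokshop|datascience|pthon" (re.escape of the literal keys)
-- and calls re.sub once with a dict-lookup replacement. For a literal alternation,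
-- re.sub is exactly one left-to-right scan that at each position tries the
-- alternatives in order and otherwise copies the character; this helper transcribes
-- that scan (exact for these literal patterns).
def scanTypos (l : List Char) : List Char :=
  match l with
  | [] => []
  | c :: t =>
    if "wokshop".toList.isPrefixOf (c :: t) then "workshop".toList ++ scanTypos (t.drop 6)
    else if "datascience".toList.isPrefixOf (c :: t) then "data science".toList ++ scanTypos (t.drop 10)
    else if "pthon".toList.isPrefixOf (c :: t) then "python".toList ++ scanTypos (t.drop 4)
    else c :: scanTypos t
termination_by l.length
decreasing_by all_goals (simp; try omega)

def handle_typos_py_alt (text : String) : String := String.ofList (scanTypos text.toList)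

-- ===== PRECONDITION & SPEC =====
-- On texts containing 'wokshopthon', A's sequential passes cascade (the inserted
-- correction 'workshop' plus the following 'thon' forms a fresh 'pthon' match), so A
-- returns e.g. 'workshopython'; B corrects each typo of the original text exactly
-- once and returns 'workshopthon', the intended behaviour of a typo-correction table.
def D_handle_typos_py (text : String) : Prop := PySem.Str.isIn "wokshopthon" text = true
instance (text : String) : Decidable (D_handle_typos_py text) := by unfold D_handle_typos_py; infer_instance

def Spec_handle_typos_py (text : String) (out : String) : Prop :=
  ¬ D_handle_typos_py text → out = handle_typos_py_alt text
instance (text : String) (out : String) : Decidable (Spec_handle_typos_py text out) := by unfold Spec_handle_typos_py; infer_instance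

def pvDiffWitness_handle_typos_py : String := "wokshopthon"
def pvDiffWitnessOut_handle_typos_py : String × String := ("workshopython", "workshopthon")

-- ===== CLAIM (what is proved, stated in full; the proofs are below) =====
def Claim_unchanged_handle_typos_py : Prop := ∀ (text : String), Dom_handle_typos_py text → Spec_handle_typos_py text (handle_typos_py text)
def Claim_exact_handle_typos_py : Prop := ∀ (text : String), Dom_handle_typos_py text → D_handle_typos_py text → handle_typos_py text ≠ handle_typos_py_alt text
def Claim_changed_handle_typos_py : Prop := Dom_handle_typos_py (pvDiffWitness_handle_typos_py) ∧ D_handle_typos_py (pvDiffWitness_handle_typos_py) ∧ handle_typos_py (pvDiffWitness_handle_typos_py) = pvDiffWitnessOut_handle_typos_py.1 ∧ handle_typos_py_alt (pvDiffWitness_handle_typos_py) = pvDiffWitnessOut_handle_typos_py.2 ∧ pvDiffWitnessOut_handle_typos_py.1 ≠ pvDiffWitnessOut_handle_typos_py.2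

-- ===== LEMMAS AND PROOFS =====

-- Structural (fuel-free) version of Python's str.replace for a nonempty pattern.
def repl (old nw : List Char) (l : List Char) : List Char :=
  match l with
  | [] => []
  | c :: t =>
    if old.isPrefixOf (c :: t) then nw ++ repl old nw (t.drop (old.length - 1))
    else c :: repl old nw t
termination_by l.length
decreasing_by all_goals (simp; try omega)

theorem go_eq (old nw : List Char) (hold : old ≠ []) :
    ∀ fuel l acc, l.length ≤ fuel →
      PySem.Chars.replace.go old nw fuel l acc = acc.reverse ++ repl old nw l := by
  intro fuel
  induction fuel with
  | zero =>
    intro l acc h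
    have : l = [] := List.eq_nil_of_length_eq_zero (Nat.le_zero.mp h)
    subst this
    simp [PySem.Chars.replace.go, repl]
  | succ n ih =>
    intro l acc h
    cases l with
    | nil => simp [PySem.Chars.replace.go, repl]
    | cons c t =>
      rw [PySem.Chars.replace.go]
      by_cases hp : old.isPrefixOf (c :: t)
      · obtain ⟨o, ot, rfl⟩ : ∃ o ot, old = o :: ot := by
          cases old with
          | nil => exact absurd rfl hold
          | cons o ot => exact ⟨o, ot, rfl⟩
        simp only [hp, if_true]
        rw [ih]
        · rw [repl, if_pos hp]
          simp [List.drop_succ_cons]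
        · simp at h ⊢; omega
      · simp only [hp]
        rw [ih t (c :: acc) (by simp at h ⊢; omega)]
        rw [repl, if_neg hp]
        simp

theorem replace_eq_repl (old nw l : List Char) (hold : old ≠ []) :
    PySem.Chars.replace l old nw = repl old nw l := by
  rw [PySem.Chars.replace]
  rw [if_neg (by simp [List.isEmpty_iff, hold])]
  rw [go_eq old nw hold l.length l [] le_rfl]
  simp

theorem repl_step (old nw : List Char) (c : Char) (t : List Char)
    (h : ¬ old.isPrefixOf (c :: t) = true) :
    repl old nw (c :: t) = c :: repl old nw t := by
  rw [repl, if_neg h]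

-- A probe q avoiding the common first character of pattern and replacement is a
-- prefix of the output of repl iff it is a prefix of its input.
theorem prefix_repl (old nw : List Char) (h : Char)
    (ho : old.head? = some h) (hn : nw.head? = some h) :
    ∀ (n : Nat) (q l : List Char), h ∉ q → l.length ≤ n →
      q.isPrefixOf (repl old nw l) = q.isPrefixOf l := by
  intro n
  induction n with
  | zero =>
    intro q l hq hl
    have : l = [] := List.eq_nil_of_length_eq_zero (Nat.le_zero.mp hl)
    subst this; rw [repl]
  | succ n ih =>
    intro q l hq hl
    cases l with
    | nil => rw [repl]
    | cons c t =>
      rw [repl]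
      by_cases hp : old.isPrefixOf (c :: t)
      · rw [if_pos hp]
        cases q with
        | nil => simp [List.isPrefixOf]
        | cons a q' =>
          obtain ⟨ot, rfl⟩ : ∃ ot, old = h :: ot := by
            cases old with
            | nil => simp at ho
            | cons o ot => simp at ho; exact ⟨ot, by rw [ho]⟩
          obtain ⟨nt, rfl⟩ : ∃ nt, nw = h :: nt := by
            cases nw with
            | nil => simp at hn
            | cons o nt => simp at hn; exact ⟨nt, by rw [hn]⟩
          have hc : c = h := by
            obtain ⟨s, hs⟩ := List.isPrefixOf_iff_prefix.mp hp
            simp at hs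
            exact hs.1.symm
          have ha : a ≠ h := fun e => hq (e ▸ List.mem_cons_self)
          subst hc
          have hac : (a == c) = false := by simp [ha]
          simp [List.isPrefixOf, hac]
      · rw [if_neg hp]
        cases q with
        | nil => simp [List.isPrefixOf]
        | cons a q' =>
          simp only [List.isPrefixOf]
          rw [ih q' t (fun m => hq (List.mem_cons_of_mem a m)) (by simp at hl; omega)]

-- A block with no occurrence of the pattern's first character passes through repl.
theorem repl_block (old nw : List Char) (h : Char) (ho : old.head? = some h) :
    ∀ (p x : List Char), h ∉ p → repl old nw (p ++ x) = p ++ repl old nw x := by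
  intro p
  induction p with
  | nil => intro x _; simp
  | cons a p' ih =>
    intro x hp
    obtain ⟨ot, rfl⟩ : ∃ ot, old = h :: ot := by
      cases old with
      | nil => simp at ho
      | cons o ot => simp at ho; exact ⟨ot, by rw [ho]⟩
    have ha : a ≠ h := fun e => hp (e ▸ List.mem_cons_self)
    rw [List.cons_append, repl, if_neg (by simp [List.isPrefixOf, Ne.symm ha])]
    rw [ih x (fun m => hp (List.mem_cons_of_mem a m)), List.cons_append]

theorem repl_match (old nw x : List Char) (hold : old ≠ []) :
    repl old nw (old ++ x) = nw ++ repl old nw x := by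
  obtain ⟨o, ot, rfl⟩ : ∃ o ot, old = o :: ot := by
    cases old with
    | nil => exact absurd rfl hold
    | cons o ot => exact ⟨o, ot, rfl⟩
  rw [List.cons_append, repl,
    if_pos (List.isPrefixOf_iff_prefix.mpr ⟨x, by simp⟩)]
  simp [List.drop_left']

theorem not_infix_append (q P x : List Char) (h : ¬ q <:+: P ++ x) : ¬ q <:+: x := by
  intro ⟨s, t, hst⟩
  exact h ⟨P ++ s, t, by rw [← hst]; simp⟩

theorem not_infix_cons (q : List Char) (c : Char) (t : List Char)
    (h : ¬ q <:+: c :: t) : ¬ q <:+: t :=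
  not_infix_append q [c] t h

-- one-step unfoldings of scanTypos at each kind of position
theorem scan_wok (x : List Char) :
    scanTypos ("wokshop".toList ++ x) = "workshop".toList ++ scanTypos x := by
  rw [show ("wokshop".toList : List Char) = 'w' :: "okshop".toList from rfl, List.cons_append]
  rw [scanTypos]
  rw [if_pos (List.isPrefixOf_iff_prefix.mpr ⟨x, by simp⟩)]
  rw [List.drop_left' (by rfl)]

theorem scan_data (x : List Char) :
    scanTypos ("datascience".toList ++ x) = "data science".toList ++ scanTypos x := by
  rw [show ("datascience".toList : List Char) = 'd' :: "atascience".toList from rfl, List.cons_append]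
  rw [scanTypos]
  rw [if_neg (by simp [List.isPrefixOf])]
  rw [if_pos (List.isPrefixOf_iff_prefix.mpr ⟨x, by simp⟩)]
  rw [List.drop_left' (by rfl)]

theorem scan_pthon (x : List Char) :
    scanTypos ("pthon".toList ++ x) = "python".toList ++ scanTypos x := by
  rw [show ("pthon".toList : List Char) = 'p' :: "thon".toList from rfl, List.cons_append]
  rw [scanTypos]
  rw [if_neg (by simp [List.isPrefixOf])]
  rw [if_neg (by simp [List.isPrefixOf])]
  rw [if_pos (List.isPrefixOf_iff_prefix.mpr ⟨x, by simp⟩)]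
  rw [List.drop_left' (by rfl)]

theorem scan_step (c : Char) (t : List Char)
    (h1 : ¬ "wokshop".toList.isPrefixOf (c :: t) = true)
    (h2 : ¬ "datascience".toList.isPrefixOf (c :: t) = true)
    (h3 : ¬ "pthon".toList.isPrefixOf (c :: t) = true) :
    scanTypos (c :: t) = c :: scanTypos t := by
  rw [scanTypos, if_neg h1, if_neg h2, if_neg h3]

theorem repl3_workshop (y : List Char)
    (hy : ¬ "thon".toList.isPrefixOf y = true) :
    repl "pthon".toList "python".toList ("workshop".toList ++ y) =
      "workshop".toList ++ repl "pthon".toList "python".toList y := by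
  rw [show ("workshop".toList : List Char) ++ y = "worksho".toList ++ ('p' :: y) from rfl]
  rw [repl_block "pthon".toList "python".toList 'p' rfl "worksho".toList _ (by decide)]
  rw [repl_step _ _ _ _ (by
    rw [show ("pthon".toList : List Char) = 'p' :: "thon".toList from rfl]
    simp only [List.isPrefixOf, BEq.rfl, Bool.true_and]
    exact hy)]
  rfl

theorem scan_thon (x : List Char) :
    scanTypos ("thon".toList ++ x) = 't' :: 'h' :: 'o' :: 'n' :: scanTypos x := by
  rw [show ("thon".toList : List Char) ++ x = 't' :: ("hon".toList ++ x) from rfl]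
  rw [scan_step _ _ (by simp [List.isPrefixOf]) (by simp [List.isPrefixOf]) (by simp [List.isPrefixOf])]
  rw [show ("hon".toList : List Char) ++ x = 'h' :: ("on".toList ++ x) from rfl]
  rw [scan_step _ _ (by simp [List.isPrefixOf]) (by simp [List.isPrefixOf]) (by simp [List.isPrefixOf])]
  rw [show ("on".toList : List Char) ++ x = 'o' :: ("n".toList ++ x) from rfl]
  rw [scan_step _ _ (by simp [List.isPrefixOf]) (by simp [List.isPrefixOf]) (by simp [List.isPrefixOf])]
  rw [show ("n".toList : List Char) ++ x = 'n' :: x from rfl]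
  rw [scan_step _ _ (by simp [List.isPrefixOf]) (by simp [List.isPrefixOf]) (by simp [List.isPrefixOf])]

theorem hthon_of (x : List Char) (hth : ¬ "thon".toList <+: x) :
    ¬ "thon".toList.isPrefixOf (repl "datascience".toList "data science".toList
      (repl "wokshop".toList "workshop".toList x)) = true := by
  rw [prefix_repl "datascience".toList "data science".toList 'd' rfl rfl
        (repl "wokshop".toList "workshop".toList x).length _ _ (by decide) le_rfl]
  rw [prefix_repl "wokshop".toList "workshop".toList 'w' rfl rfl
        x.length _ _ (by decide) le_rfl]
  exact fun hp => hth (List.isPrefixOf_iff_prefix.mp hp)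

-- the three replaces all step over a position at which no key matches
theorem repl_all_step (c : Char) (t : List Char)
    (h1 : ¬ "wokshop".toList.isPrefixOf (c :: t) = true)
    (h2 : ¬ "datascience".toList.isPrefixOf (c :: t) = true)
    (h3 : ¬ "pthon".toList.isPrefixOf (c :: t) = true) :
    repl "pthon".toList "python".toList
      (repl "datascience".toList "data science".toList
        (repl "wokshop".toList "workshop".toList (c :: t))) =
    c :: repl "pthon".toList "python".toList
      (repl "datascience".toList "data science".toList
        (repl "wokshop".toList "workshop".toList t)) := by
  have e1 : repl "wokshop".toList "workshop".toList (c :: t) =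
      c :: repl "wokshop".toList "workshop".toList t := repl_step _ _ _ _ h1
  have e2 : repl "datascience".toList "data science".toList
      (c :: repl "wokshop".toList "workshop".toList t) =
      c :: repl "datascience".toList "data science".toList
        (repl "wokshop".toList "workshop".toList t) := by
    apply repl_step
    rw [← e1]
    rw [prefix_repl "wokshop".toList "workshop".toList 'w' rfl rfl
          (c :: t).length _ _ (by decide) le_rfl]
    exact h2
  have e3 : repl "pthon".toList "python".toList
      (c :: repl "datascience".toList "data science".toList
        (repl "wokshop".toList "workshop".toList t)) =
      c :: repl "pthon".toList "python".toList
        (repl "datascience".toList "data science".toList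
          (repl "wokshop".toList "workshop".toList t)) := by
    apply repl_step
    rw [← e2, ← e1]
    rw [prefix_repl "datascience".toList "data science".toList 'd' rfl rfl
          (repl "wokshop".toList "workshop".toList (c :: t)).length _ _
          (by decide) le_rfl]
    rw [prefix_repl "wokshop".toList "workshop".toList 'w' rfl rfl
          (c :: t).length _ _ (by decide) le_rfl]
    exact h3
  rw [e1, e2, e3]

-- Main equivalence on character lists: three sequential replaces = one combined
-- scan, provided the text has no "wokshopthon" (the only chance for a cascade).
theorem main_scan :
    ∀ (n : Nat) (l : List Char), l.length ≤ n → ¬ ("wokshopthon".toList <:+: l) →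
      repl "pthon".toList "python".toList
        (repl "datascience".toList "data science".toList
          (repl "wokshop".toList "workshop".toList l)) = scanTypos l := by
  intro n
  induction n with
  | zero =>
    intro l hl _
    have : l = [] := List.eq_nil_of_length_eq_zero (Nat.le_zero.mp hl)
    subst this
    rw [repl, repl, repl, scanTypos]
  | succ n ih =>
    intro l hl hinf
    by_cases h1 : "wokshop".toList.isPrefixOf l
    · obtain ⟨x, rfl⟩ := List.isPrefixOf_iff_prefix.mp h1
      rw [repl_match _ _ _ (by decide)]
      rw [repl_block "datascience".toList "data science".toList 'd' rfl
            "workshop".toList _ (by decide)]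
      have hthon := hthon_of x
        (fun h => h.elim (fun x' hx' => hinf ⟨[], x', by rw [← hx']; rfl⟩))
      rw [repl3_workshop _ hthon]
      rw [scan_wok]
      rw [ih x (by simp at hl ⊢; omega) (not_infix_append _ _ _ hinf)]
    · by_cases h2 : "datascience".toList.isPrefixOf l
      · obtain ⟨x, rfl⟩ := List.isPrefixOf_iff_prefix.mp h2
        rw [repl_block "wokshop".toList "workshop".toList 'w' rfl
              "datascience".toList _ (by decide)]
        rw [repl_match _ _ _ (by decide)]
        rw [repl_block "pthon".toList "python".toList 'p' rfl
              "data science".toList _ (by decide)]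
        rw [scan_data]
        rw [ih x (by simp at hl ⊢; omega) (not_infix_append _ _ _ hinf)]
      · by_cases h3 : "pthon".toList.isPrefixOf l
        · obtain ⟨x, rfl⟩ := List.isPrefixOf_iff_prefix.mp h3
          rw [repl_block "wokshop".toList "workshop".toList 'w' rfl
                "pthon".toList _ (by decide)]
          rw [repl_block "datascience".toList "data science".toList 'd' rfl
                "pthon".toList _ (by decide)]
          rw [repl_match _ _ _ (by decide)]
          rw [scan_pthon]
          rw [ih x (by simp at hl ⊢; omega) (not_infix_append _ _ _ hinf)]
        · cases l with
          | nil => rw [repl, repl, repl, scanTypos]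
          | cons c t =>
            rw [repl_all_step c t h1 h2 h3, scan_step c t h1 h2 h3]
            rw [ih t (by simp at hl; omega) (not_infix_cons _ _ _ hinf)]

theorem ne_append_of_getElem? (a b u v : List Char) (i : Nat)
    (ha : i < a.length) (hb : i < b.length) (hne : a[i]? ≠ b[i]?) :
    a ++ u ≠ b ++ v := by
  intro he
  apply hne
  have h1 : (a ++ u)[i]? = (b ++ v)[i]? := by rw [he]
  rwa [List.getElem?_append_left ha, List.getElem?_append_left hb] at h1

-- an occurrence of c :: r inside P ++ x, where c occurs in P only at its head,
-- either starts at position 0 or lies entirely inside x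
theorem shift_lemma (P x s r t : List Char) (c : Char)
    (hc : ∀ i, (hi : i < P.length) → P[i] = c → i = 0)
    (h : s ++ (c :: r) ++ t = P ++ x) :
    s = [] ∨ ∃ s', s = P ++ s' ∧ s' ++ (c :: r) ++ t = x := by
  by_cases hlen : P.length ≤ s.length
  · right
    have hs : s <+: P ++ x := ⟨(c :: r) ++ t, by rw [← List.append_assoc, h]⟩
    have hPs : P <+: s := by
      rcases List.prefix_or_prefix_of_prefix (⟨x, rfl⟩ : P <+: P ++ x) hs with h' | h'
      · exact h'
      · exact (h'.eq_of_length_le hlen) ▸ List.prefix_refl _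
    obtain ⟨s', rfl⟩ := hPs
    refine ⟨s', rfl, ?_⟩
    have h2 : P ++ (s' ++ ((c :: r) ++ t)) = P ++ x := by
      simpa [List.append_assoc] using h
    simpa [List.append_assoc] using List.append_cancel_left h2
  · left
    have hlen' : s.length < P.length := Nat.lt_of_not_le hlen
    have h1 : (s ++ (c :: r) ++ t)[s.length]? = some c := by
      rw [List.append_assoc, List.getElem?_append_right le_rfl]
      simp
    rw [h, List.getElem?_append_left hlen'] at h1
    rw [List.getElem?_eq_getElem hlen'] at h1
    exact List.eq_nil_of_length_eq_zero (hc s.length hlen' (Option.some.inj h1))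

-- Inside D_ the two programs differ everywhere: A cascades at the first
-- "wokshopthon" (producing a 'y' where B keeps the 't').
theorem main_diff :
    ∀ (n : Nat) (l : List Char), l.length ≤ n → ("wokshopthon".toList <:+: l) →
      repl "pthon".toList "python".toList
        (repl "datascience".toList "data science".toList
          (repl "wokshop".toList "workshop".toList l)) ≠ scanTypos l := by
  intro n
  induction n with
  | zero =>
    intro l hl hinf
    have : l = [] := List.eq_nil_of_length_eq_zero (Nat.le_zero.mp hl)
    subst this
    obtain ⟨s, t, hst⟩ := hinf
    simp [List.append_eq_nil_iff] at hst
  | succ n ih =>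
    intro l hl hinf
    by_cases h1 : "wokshop".toList.isPrefixOf l
    · obtain ⟨x, rfl⟩ := List.isPrefixOf_iff_prefix.mp h1
      by_cases hth : "thon".toList <+: x
      · obtain ⟨x'', rfl⟩ := hth
        rw [repl_match _ _ _ (by decide)]
        rw [repl_block "wokshop".toList "workshop".toList 'w' rfl "thon".toList _ (by decide)]
        rw [show ("workshop".toList : List Char) ++
              ("thon".toList ++ repl "wokshop".toList "workshop".toList x'') =
              "workshopthon".toList ++ repl "wokshop".toList "workshop".toList x'' from rfl]
        rw [repl_block "datascience".toList "data science".toList 'd' rfl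
              "workshopthon".toList _ (by decide)]
        have hsplit : ∀ (y : List Char), ("workshopthon".toList : List Char) ++ y =
            "worksho".toList ++ ("pthon".toList ++ y) := fun y => rfl
        rw [hsplit]
        rw [repl_block "pthon".toList "python".toList 'p' rfl "worksho".toList _ (by decide)]
        rw [repl_match _ _ _ (by decide)]
        rw [scan_wok, scan_thon]
        rw [show ∀ (y : List Char), ("worksho".toList : List Char) ++ ("python".toList ++ y) =
              "workshopython".toList ++ y from fun y => rfl]
        rw [show ∀ (y : List Char), ("workshop".toList : List Char) ++ ('t' :: 'h' :: 'o' :: 'n' :: y) =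
              "workshopthon".toList ++ y from fun y => rfl]
        exact ne_append_of_getElem? _ _ _ _ 8 (by decide) (by decide) (by decide)
      · obtain ⟨s, t, hst⟩ := hinf
        rw [show ("wokshopthon".toList : List Char) = 'w' :: "okshopthon".toList from rfl] at hst
        rcases shift_lemma "wokshop".toList x s "okshopthon".toList t 'w' (by decide) hst with hs0 | ⟨s', rfl, hx⟩
        · exfalso
          subst hs0
          simp only [List.nil_append] at hst
          refine hth ⟨t, List.append_cancel_left (as := "wokshop".toList) ?_⟩
          rw [← hst]
          rfl
        · have Px : ("wokshopthon".toList : List Char) <:+: x := ⟨s', t, hx⟩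
          rw [repl_match _ _ _ (by decide)]
          rw [repl_block "datascience".toList "data science".toList 'd' rfl
                "workshop".toList _ (by decide)]
          rw [repl3_workshop _ (hthon_of x hth)]
          rw [scan_wok]
          intro he
          exact ih x (by simp at hl; omega) Px (List.append_cancel_left he)
    · by_cases h2 : "datascience".toList.isPrefixOf l
      · obtain ⟨x, rfl⟩ := List.isPrefixOf_iff_prefix.mp h2
        obtain ⟨s, t, hst⟩ := hinf
        rw [show ("wokshopthon".toList : List Char) = 'w' :: "okshopthon".toList from rfl] at hst
        rcases shift_lemma "datascience".toList x s "okshopthon".toList t 'w' (by decide) hst with hs0 | ⟨s', rfl, hx⟩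
        · exfalso
          subst hs0
          simp only [List.nil_append] at hst
          have := congrArg List.head? hst
          simp at this
        · have Px : ("wokshopthon".toList : List Char) <:+: x := ⟨s', t, hx⟩
          rw [repl_block "wokshop".toList "workshop".toList 'w' rfl
                "datascience".toList _ (by decide)]
          rw [repl_match _ _ _ (by decide)]
          rw [repl_block "pthon".toList "python".toList 'p' rfl
                "data science".toList _ (by decide)]
          rw [scan_data]
          intro he
          exact ih x (by simp at hl; omega) Px (List.append_cancel_left he)
      · by_cases h3 : "pthon".toList.isPrefixOf l
        · obtain ⟨x, rfl⟩ := List.isPrefixOf_iff_prefix.mp h3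
          obtain ⟨s, t, hst⟩ := hinf
          rw [show ("wokshopthon".toList : List Char) = 'w' :: "okshopthon".toList from rfl] at hst
          rcases shift_lemma "pthon".toList x s "okshopthon".toList t 'w' (by decide) hst with hs0 | ⟨s', rfl, hx⟩
          · exfalso
            subst hs0
            simp only [List.nil_append] at hst
            have := congrArg List.head? hst
            simp at this
          · have Px : ("wokshopthon".toList : List Char) <:+: x := ⟨s', t, hx⟩
            rw [repl_block "wokshop".toList "workshop".toList 'w' rfl
                  "pthon".toList _ (by decide)]
            rw [repl_block "datascience".toList "data science".toList 'd' rfl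
                  "pthon".toList _ (by decide)]
            rw [repl_match _ _ _ (by decide)]
            rw [scan_pthon]
            intro he
            exact ih x (by simp at hl; omega) Px (List.append_cancel_left he)
        · cases l with
          | nil =>
            obtain ⟨s, t, hst⟩ := hinf
            simp [List.append_eq_nil_iff] at hst
          | cons c t =>
            rw [repl_all_step c t h1 h2 h3, scan_step c t h1 h2 h3]
            have Pt : ("wokshopthon".toList : List Char) <:+: t := by
              obtain ⟨s, t', hst⟩ := hinf
              cases s with
              | nil =>
                exfalso
                apply h1
                simp only [List.nil_append] at hst
                apply List.isPrefixOf_iff_prefix.mpr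
                refine ⟨"thon".toList ++ t', ?_⟩
                rw [← hst]
                rfl
              | cons a s' =>
                rw [List.cons_append, List.cons_append] at hst
                injection hst with _ h2'
                exact ⟨s', t', h2'⟩
            intro he
            have he' : repl "pthon".toList "python".toList
                (repl "datascience".toList "data science".toList
                  (repl "wokshop".toList "workshop".toList t)) = scanTypos t := by
              have h' := he
              simp only [List.cons.injEq, true_and] at h'
              exact h'
            exact ih t (by simp at hl; omega) Pt he'

-- ===== VERDICT (by name: the statement is the Claim_ definition above) =====
theorem handle_typos_py_spec : Claim_unchanged_handle_typos_py := by
  intro text _ hD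
  have h0 : handle_typos_py text = PySem.Str.replace (PySem.Str.replace
      (PySem.Str.replace text "wokshop" "workshop") "datascience" "data science")
      "pthon" "python" := rfl
  rw [h0, handle_typos_py_alt, PySem.Str.replace, PySem.Str.replace, PySem.Str.replace]
  refine congrArg String.ofList ?_
  rw [String.toList_ofList, String.toList_ofList]
  rw [replace_eq_repl _ _ _ (by decide), replace_eq_repl _ _ _ (by decide),
      replace_eq_repl _ _ _ (by decide)]
  exact main_scan text.toList.length text.toList le_rfl
    (fun h => hD ((PySem.Str.isIn_iff_infix _ _).mpr h))

theorem handle_typos_py_changed : Claim_changed_handle_typos_py := by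
  unfold Claim_changed_handle_typos_py
  refine ⟨by decide, by decide, by decide, ?_, by decide⟩
  show String.ofList (scanTypos "wokshopthon".toList) = _
  rw [show scanTypos "wokshopthon".toList = "workshopthon".toList from by simp [scanTypos]]
  decide

theorem handle_typos_py_tight : Claim_exact_handle_typos_py := by
  intro text _ hD he
  have hinf := (PySem.Str.isIn_iff_infix _ _).mp hD
  have hA : (handle_typos_py text).toList =
      repl "pthon".toList "python".toList
        (repl "datascience".toList "data science".toList
          (repl "wokshop".toList "workshop".toList text.toList)) := by
    rw [show handle_typos_py text = PySem.Str.replace (PySem.Str.replace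
        (PySem.Str.replace text "wokshop" "workshop") "datascience" "data science")
        "pthon" "python" from rfl]
    rw [PySem.Str.replace, PySem.Str.replace, PySem.Str.replace]
    rw [String.toList_ofList, String.toList_ofList, String.toList_ofList]
    rw [replace_eq_repl _ _ _ (by decide), replace_eq_repl _ _ _ (by decide),
        replace_eq_repl _ _ _ (by decide)]
  have hB : (handle_typos_py_alt text).toList = scanTypos text.toList := by
    rw [handle_typos_py_alt, String.toList_ofList]
  apply main_diff text.toList.length text.toList le_rfl hinf
  rw [← hA, ← hB, he]
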